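-- pv_equiv track=rewrite | github.com/ShapeLayer/training | tasks/online_judge/baekjoon/python/14235.py | compute
-- ===== SOURCE A (Python) =====
-- import heapq
--
-- def compute(n: int, queries: list[tuple[int]]) -> list[int]:
--     result: list[int] = []
--     presents: list[int] = []
--     for query in queries:
--         if query[0] == 0:
--             if presents:
--                 result.append(-heapq.heappop(presents))
--             else:
--                 result.append(-1)
--         else:
--             for i in range(1, query[0] + 1):
--                 heapq.heappush(presents, -query[i])
--     return result
-- ===== SOURCE B (Python) =====
-- def compute(n: int, queries: list[tuple[int]]) -> list[int]:
--     result: list[int] = []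
--     presents: list[int] = []  # kept in ascending order
--     for query in queries:
--         if query[0] == 0:
--             result.append(presents.pop() if presents else -1)
--         else:
--             for i in range(1, query[0] + 1):
--                 x = query[i]
--                 # binary search for the insertion point (after any equal elements)
--                 lo, hi = 0, len(presents)
--                 while lo < hi:
--                     mid = (lo + hi) // 2
--                     if x < presents[mid]:
--                         hi = mid
--                     else:
--                         lo = mid + 1
--                 presents.insert(lo, x)
--     return result
-- ===== Notes on version B (the rewrite author's own statement) =====
-- stated objective: alternative
-- what changed: Replaces the negated min-heap with an ascending sorted list: each inserted value is placed at its ordered position found by a hand-written binary search, and a pop query just removes the last (maximal) element, instead of heap sift operations on negated values.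
import Mathlib
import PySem

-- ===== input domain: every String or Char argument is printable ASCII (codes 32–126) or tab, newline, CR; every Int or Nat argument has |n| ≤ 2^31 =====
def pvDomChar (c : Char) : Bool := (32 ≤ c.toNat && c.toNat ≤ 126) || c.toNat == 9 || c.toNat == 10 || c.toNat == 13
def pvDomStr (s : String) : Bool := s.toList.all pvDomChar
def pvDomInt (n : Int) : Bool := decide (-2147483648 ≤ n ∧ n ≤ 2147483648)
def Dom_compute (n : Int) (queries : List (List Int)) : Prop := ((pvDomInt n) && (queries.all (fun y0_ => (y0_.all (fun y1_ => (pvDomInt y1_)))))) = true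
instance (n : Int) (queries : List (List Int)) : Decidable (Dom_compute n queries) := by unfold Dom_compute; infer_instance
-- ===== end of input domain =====

-- B replaces A's negated min-heap with an ascending sorted list (ordered insertion, pop from the tail); same outputs, similar cost.


-- ===== PORT A =====
-- heapq is modelled by its multiset contract: heappush adds the element, heappop returns
-- (and removes one occurrence of) the minimum element of the heap.  The popped VALUE —
-- the only thing A's result depends on — is exactly what CPython's heappop returns.
def heapPush (h : List Int) (x : Int) : List Int := h ++ [x]

def heapPop (h : List Int) : Option (Int × List Int) :=
  match PySem.List.min? h (fun x => x) with
  | none => none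
  | some m => some (m, h.erase m)

def stepA (st : List Int × List Int) (q : List Int) : List Int × List Int :=
  if PySem.List.pyGetD q 0 0 = 0 then
    match heapPop st.2 with
    | some (m, h') => (st.1 ++ [-m], h')
    | none => (st.1 ++ [-1], st.2)
  else
    (st.1, (PySem.List.pyRange 1 (PySem.List.pyGetD q 0 0 + 1) 1).foldl
      (fun h i => heapPush h (-(PySem.List.pyGetD q i 0))) st.2)

def compute (n : Int) (queries : List (List Int)) : List Int :=
  (queries.foldl stepA ([], [])).1

-- ===== PORT B =====
-- Source B's hand-written binary search: while lo < hi: mid = (lo+hi)//2; if x < presents[mid]: hi = mid else: lo = mid+1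
def bsLoop (s : List Int) (x : Int) (lo hi : Int) : Int :=
  if _h : lo < hi then
    let mid := PySem.Int.floordiv (lo + hi) 2
    if x < PySem.List.pyGetD s mid 0 then bsLoop s x lo mid
    else bsLoop s x (mid + 1) hi
  else lo
termination_by (hi - lo).toNat
decreasing_by
  · have h1 := (PySem.Int.floordiv_two_mid_bounds (le_of_lt _h)).1
    have h2 : PySem.Int.floordiv (lo + hi) 2 < hi :=
      (PySem.Int.floordiv_lt_iff_lt_mul (by norm_num)).mpr (by omega)
    omega
  · have h1 := (PySem.Int.floordiv_two_mid_bounds (le_of_lt _h)).1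
    have h2 : PySem.Int.floordiv (lo + hi) 2 < hi :=
      (PySem.Int.floordiv_lt_iff_lt_mul (by norm_num)).mpr (by omega)
    omega

-- presents.insert(lo, x) after the search, with lo, hi = 0, len(presents)
def binsert (s : List Int) (x : Int) : List Int :=
  s.insertIdx (bsLoop s x 0 (s.length : Int)).toNat x

def stepB (st : List Int × List Int) (q : List Int) : List Int × List Int :=
  if PySem.List.pyGetD q 0 0 = 0 then
    match st.2.getLast? with
    | some v => (st.1 ++ [v], st.2.dropLast)
    | none => (st.1 ++ [-1], st.2)
  else
    (st.1, (PySem.List.pyRange 1 (PySem.List.pyGetD q 0 0 + 1) 1).foldl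
      (fun s i => binsert s (PySem.List.pyGetD q i 0)) st.2)

def compute_alt (n : Int) (queries : List (List Int)) : List Int :=
  (queries.foldl stepB ([], [])).1

-- ===== PRECONDITION & SPEC =====
-- Pre_ excludes exactly the inputs where Python A raises IndexError: an empty query
-- (query[0] fails) or an insert query whose count query[0] reaches past its end.
def Pre_compute (n : Int) (queries : List (List Int)) : Prop :=
  ∀ q ∈ queries, q ≠ [] ∧ q.headI < (q.length : Int)
instance (n : Int) (queries : List (List Int)) : Decidable (Pre_compute n queries) := by
  unfold Pre_compute; infer_instance

def pvWitness_compute : Int × List (List Int) := (3, [[2, 5, 3], [0], [0], [0]])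

def Spec_compute (n : Int) (queries : List (List Int)) (out : List Int) : Prop := out = compute_alt n queries
instance (n : Int) (queries : List (List Int)) (out : List Int) : Decidable (Spec_compute n queries out) := by unfold Spec_compute; infer_instance

-- ===== CLAIM (what is proved, stated in full; the proofs are below) =====
def Claim_equal_compute : Prop := ∀ (n : Int) (queries : List (List Int)), Dom_compute n queries → Pre_compute n queries → Spec_compute n queries (compute n queries)

-- ===== LEMMAS AND PROOFS =====

-- The coupling invariant: A's heap is, as a multiset, the negation of B's list, and B's list is ascending.
def PQInv (hA sB : List Int) : Prop :=
  hA.Perm (sB.map (fun x => -x)) ∧ List.Pairwise (· ≤ ·) sB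

theorem bsLoop_spec (s : List Int) (x : Int) (hs : List.Pairwise (· ≤ ·) s) :
    ∀ (N : Nat) (lo hi : Int), (hi - lo).toNat ≤ N → 0 ≤ lo → lo ≤ hi → hi ≤ (s.length : Int) →
    (∀ k : Nat, k < lo.toNat → ∀ hk : k < s.length, s[k] ≤ x) →
    (∀ k : Nat, hi.toNat ≤ k → ∀ hk : k < s.length, x < s[k]) →
    0 ≤ bsLoop s x lo hi ∧ bsLoop s x lo hi ≤ (s.length : Int) ∧
    (∀ k : Nat, k < (bsLoop s x lo hi).toNat → ∀ hk : k < s.length, s[k] ≤ x) ∧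
    (∀ k : Nat, (bsLoop s x lo hi).toNat ≤ k → ∀ hk : k < s.length, x < s[k]) := by
  intro N
  induction N with
  | zero =>
    intro lo hi hN h0 h1 h2 hlow hhigh
    have hnlt : ¬ lo < hi := by omega
    rw [bsLoop, dif_neg hnlt]
    refine ⟨h0, by omega, hlow, ?_⟩
    intro k hk hklen
    exact hhigh k (by omega) hklen
  | succ N ih =>
    intro lo hi hN h0 h1 h2 hlow hhigh
    rw [bsLoop]
    by_cases hlt : lo < hi
    · rw [dif_pos hlt]
      have hmidlo : lo ≤ PySem.Int.floordiv (lo + hi) 2 :=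
        (PySem.Int.floordiv_two_mid_bounds (le_of_lt hlt)).1
      have hmidhi : PySem.Int.floordiv (lo + hi) 2 < hi :=
        (PySem.Int.floordiv_lt_iff_lt_mul (by norm_num)).mpr (by omega)
      set mid := PySem.Int.floordiv (lo + hi) 2 with hmid
      have hget : PySem.List.pyGetD s mid 0 = s[mid.toNat] :=
        PySem.List.pyGetD_eq_getElem s 0 (by omega) (by omega)
      have hmono := List.pairwise_iff_getElem.mp hs
      by_cases hx : x < PySem.List.pyGetD s mid 0
      · rw [if_pos hx]
        rw [hget] at hx
        refine ih lo mid (by omega) h0 hmidlo (by omega) hlow ?_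
        intro k hk hklen
        rcases eq_or_lt_of_le hk with hk' | hk'
        · have hkeq : k = mid.toNat := hk'.symm
          subst hkeq
          exact hx
        · exact lt_of_lt_of_le hx (hmono mid.toNat k (by omega) hklen hk')
      · rw [if_neg hx]
        rw [hget] at hx
        rw [not_lt] at hx
        refine ih (mid + 1) hi (by omega) (by omega) (by omega) h2 ?_ hhigh
        intro k hk hklen
        have hkmid : k ≤ mid.toNat := by omega
        rcases eq_or_lt_of_le hkmid with hk' | hk'
        · subst hk'
          exact hx
        · exact le_trans (hmono k mid.toNat hklen (by omega) hk') hx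
    · rw [dif_neg hlt]
      refine ⟨h0, by omega, hlow, ?_⟩
      intro k hk hklen
      exact hhigh k (by omega) hklen

theorem insertIdx_eq_take_cons_drop (s : List Int) (j : Nat) (x : Int) (hj : j ≤ s.length) :
    s.insertIdx j x = s.take j ++ x :: s.drop j := by
  induction j generalizing s with
  | zero => simp
  | succ j ihj =>
    cases s with
    | nil => simp at hj
    | cons a t =>
      simp only [List.insertIdx_succ_cons, List.take_succ_cons, List.drop_succ_cons,
        List.cons_append]
      rw [ihj t (by simpa using hj)]

theorem binsert_perm (s : List Int) (x : Int) (hs : List.Pairwise (· ≤ ·) s) :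
    (binsert s x).Perm (x :: s) := by
  have hspec := bsLoop_spec s x hs ((s.length : Int) - 0).toNat 0 (s.length : Int)
    (le_refl _) (le_refl _) (by omega) (by omega) (by omega) (by intro k hk; omega)
  exact List.perm_insertIdx x s (by omega)

theorem binsert_sorted (s : List Int) (x : Int) (hs : List.Pairwise (· ≤ ·) s) :
    List.Pairwise (· ≤ ·) (binsert s x) := by
  have hspec := bsLoop_spec s x hs ((s.length : Int) - 0).toNat 0 (s.length : Int)
    (le_refl _) (le_refl _) (by omega) (by omega) (by omega) (by intro k hk; omega)
  obtain ⟨hj0, hjlen, hle, hgt⟩ := hspec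
  set j := (bsLoop s x 0 (s.length : Int)).toNat with hj
  have hjle : j ≤ s.length := by omega
  rw [binsert, insertIdx_eq_take_cons_drop s j x hjle]
  rw [List.pairwise_append]
  refine ⟨hs.sublist (List.take_sublist _ _), ?_, ?_⟩
  · rw [List.pairwise_cons]
    refine ⟨?_, hs.sublist (List.drop_sublist _ _)⟩
    intro b hb
    obtain ⟨k, hk, hkb⟩ := List.mem_drop_iff_getElem.mp hb
    exact le_of_lt (hkb ▸ hgt (j + k) (by omega) (by omega))
  · intro a ha b hb
    obtain ⟨k, hk, hka⟩ := List.mem_take_iff_getElem.mp ha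
    have hax : a ≤ x := hka ▸ hle k (by omega) (by omega)
    rw [List.mem_cons] at hb
    rcases hb with hb | hb
    · omega
    · obtain ⟨m, hm, hmb⟩ := List.mem_drop_iff_getElem.mp hb
      have : x < b := hmb ▸ hgt (j + m) (by omega) (by omega)
      omega

theorem sorted_le_getLast (s : List Int) (h : List.Pairwise (· ≤ ·) s) (hne : s ≠ [])
    (b : Int) (hb : b ∈ s) : b ≤ s.getLast hne := by
  induction s with
  | nil => simp at hb
  | cons y ys ih =>
    rw [List.pairwise_cons] at h
    rw [List.mem_cons] at hb
    rcases hb with hb | hb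
    · cases ys with
      | nil => simp [hb]
      | cons z zs =>
        rw [List.getLast_cons (by simp), hb]
        exact h.1 _ (List.getLast_mem _)
    · cases ys with
      | nil => simp at hb
      | cons z zs =>
        rw [List.getLast_cons (by simp)]
        exact ih h.2 (by simp) hb

-- one pushed element preserves the invariant
theorem inv_push (hA sB : List Int) (x : Int) (h : PQInv hA sB) :
    PQInv (heapPush hA (-x)) (binsert sB x) := by
  obtain ⟨hperm, hsort⟩ := h
  refine ⟨?_, binsert_sorted sB x hsort⟩
  have h1 : (heapPush hA (-x)).Perm (-x :: hA) := List.perm_append_singleton _ _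
  have h2 : ((binsert sB x).map (fun x => -x)).Perm (-x :: sB.map (fun x => -x)) := by
    simpa using (binsert_perm sB x hsort).map (fun x => -x)
  exact h1.trans ((hperm.cons (-x)).trans h2.symm)

-- the whole insertion loop preserves the invariant (for ANY index list: both sides read
-- the same values pyGetD q i 0)
theorem inv_fold (l : List Int) (q : List Int) (hA sB : List Int) (h : PQInv hA sB) :
    PQInv (l.foldl (fun h i => heapPush h (-(PySem.List.pyGetD q i 0))) hA)
        (l.foldl (fun s i => binsert s (PySem.List.pyGetD q i 0)) sB) := by
  induction l generalizing hA sB with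
  | nil => exact h
  | cons i is ih => exact ih _ _ (inv_push hA sB _ h)

-- the pop query: A pops the minimum of the negated heap, B pops the tail of the sorted list
theorem inv_pop (hA sB : List Int) (h : PQInv hA sB) (hne : sB ≠ []) :
    heapPop hA = some (-(sB.getLast hne), hA.erase (-(sB.getLast hne))) ∧
      PQInv (hA.erase (-(sB.getLast hne))) sB.dropLast := by
  obtain ⟨hperm, hsort⟩ := h
  have hAne : hA ≠ [] := by
    intro hnil
    rw [hnil] at hperm
    exact hne (List.map_eq_nil_iff.mp hperm.symm.eq_nil)
  set L := sB.getLast hne with hL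
  have hLmem : -L ∈ hA := by
    rw [hperm.mem_iff]
    exact List.mem_map_of_mem (List.getLast_mem hne)
  have hmin : PySem.List.min? hA (fun x => x) = some (-L) := by
    cases hm : PySem.List.min? hA (fun x => x) with
    | none =>
      rw [PySem.List.min?_eq_none_iff hA _] at hm
      exact absurd hm hAne
    | some m =>
      have hmem := PySem.List.min?_mem hm
      have hisMinV := PySem.List.min?_isMin hm
      have h1 : m ≤ -L := hisMinV _ hLmem
      have h2 : -L ≤ m := by
        have := hperm.mem_iff.mp hmem
        obtain ⟨b, hb, hbm⟩ := List.mem_map.mp this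
        have := sorted_le_getLast sB hsort hne b hb
        omega
      have : m = -L := le_antisymm h1 h2
      rw [this]
  have hsplit : sB.dropLast ++ [L] = sB := List.dropLast_append_getLast hne
  have hpermTail : (hA.erase (-L)).Perm (sB.dropLast.map (fun x => -x)) := by
    have hmap : sB.map (fun x => -x) = sB.dropLast.map (fun x => -x) ++ [-L] := by
      conv_lhs => rw [← hsplit]
      simp
    have hc : hA.Perm (-L :: sB.dropLast.map (fun x => -x)) := by
      rw [hmap] at hperm
      exact hperm.trans (List.perm_append_singleton _ _)
    have he : hA.Perm (-L :: hA.erase (-L)) := List.perm_cons_erase hLmem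
    exact (he.symm.trans hc).cons_inv
  refine ⟨?_, hpermTail, ?_⟩
  · simp [heapPop, hmin]
  · rw [← hsplit] at hsort
    exact (List.pairwise_append.mp hsort).1

-- one query step: equal result lists stay equal, the invariant is preserved
theorem step_eq (q : List Int) (r hA sB : List Int) (h : PQInv hA sB) :
    (stepA (r, hA) q).1 = (stepB (r, sB) q).1 ∧ PQInv (stepA (r, hA) q).2 (stepB (r, sB) q).2 := by
  by_cases h0 : PySem.List.pyGetD q 0 0 = 0
  · simp only [stepA, stepB]
    rw [if_pos h0, if_pos h0]
    by_cases hne : sB = []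
    · have hAnil : hA = [] := by
        have h1 := h.1
        rw [hne] at h1
        exact h1.eq_nil
      subst hAnil; subst hne
      exact ⟨rfl, h⟩
    · obtain ⟨hpop, hinv⟩ := inv_pop hA sB h hne
      rw [hpop, List.getLast?_eq_getLast_of_ne_nil hne]
      exact ⟨by simp, hinv⟩
  · simp only [stepA, stepB]
    rw [if_neg h0, if_neg h0]
    exact ⟨rfl, inv_fold _ q hA sB h⟩

theorem fold_eq (queries : List (List Int)) (r hA sB : List Int) (h : PQInv hA sB) :
    (queries.foldl stepA (r, hA)).1 = (queries.foldl stepB (r, sB)).1 := by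
  induction queries generalizing r hA sB with
  | nil => rfl
  | cons q qs ih =>
    obtain ⟨h1, h2⟩ := step_eq q r hA sB h
    simp only [List.foldl_cons]
    have hsA : stepA (r, hA) q = ((stepA (r, hA) q).1, (stepA (r, hA) q).2) := rfl
    have hsB : stepB (r, sB) q = ((stepB (r, sB) q).1, (stepB (r, sB) q).2) := rfl
    rw [hsA, hsB, h1]
    exact ih _ _ _ h2

-- ===== VERDICT (by name: the statement is the Claim_ definition above) =====
theorem compute_spec : Claim_equal_compute := by
  intro n queries _ _
  unfold Spec_compute compute compute_alt
  exact fold_eq queries [] [] [] ⟨by simp, by simp⟩
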